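-- pv_equiv track=rewrite | github.com/NERSC/pytokio | tokio/cli/summarize_job.py | _identify_fs_from_path
-- ===== SOURCE A (Python) =====
-- def _identify_fs_from_path(path, mounts):
--     """
--     Scan a list of mount points and try to identify the one that matches the
--     given path
--
--     """
--     max_match = 0
--     matching_mount = None
--     for mount in mounts:
--         if path.startswith(mount) and len(mount) > max_match:
--             max_match = len(mount)
--             matching_mount = mount
--     return matching_mount
-- ===== SOURCE B (Python) =====
-- def _identify_fs_from_path(path, mounts):
--     """Sort-then-pick: gather non-empty mounts that prefix the path, stably
--     sort them by length descending, and return the first one (or None)."""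
--     candidates = sorted((m for m in mounts if m and path.startswith(m)),
--                         key=len, reverse=True)
--     return candidates[0] if candidates else None
-- ===== Notes on version B (the rewrite author's own statement) =====
-- stated objective: alternative
-- what changed: Replaces A's single max-tracking scan with filter non-empty prefix candidates, stable sort by length descending, take first element (stability preserves A's first-of-max tie-break).
import Mathlib
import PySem

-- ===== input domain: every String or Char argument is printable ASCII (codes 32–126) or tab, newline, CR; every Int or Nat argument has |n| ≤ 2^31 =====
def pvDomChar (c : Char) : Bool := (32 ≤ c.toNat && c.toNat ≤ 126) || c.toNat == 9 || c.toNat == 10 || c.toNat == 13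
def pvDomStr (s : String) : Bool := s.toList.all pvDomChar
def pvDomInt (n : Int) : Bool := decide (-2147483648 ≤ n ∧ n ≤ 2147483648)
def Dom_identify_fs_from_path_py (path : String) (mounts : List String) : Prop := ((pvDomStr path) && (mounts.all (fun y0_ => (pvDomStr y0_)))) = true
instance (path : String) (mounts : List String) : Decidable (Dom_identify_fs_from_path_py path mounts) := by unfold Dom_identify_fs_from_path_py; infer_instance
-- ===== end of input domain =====

-- B replaces A's max-tracking scan by filter + stable descending-length sort + first element (alternative decomposition, not faster).

-- ===== PORT A =====
-- literal port of A: fold over mounts carrying (max_match, matching_mount)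
def identify_fs_from_path_py (path : String) (mounts : List String) : Option String :=
  (mounts.foldl
    (fun s mount =>
      if PySem.Str.startswith path mount = true ∧ s.1 < PySem.Str.len mount then
        (PySem.Str.len mount, some mount)
      else s)
    ((0 : Int), (none : Option String))).2

-- ===== PORT B =====
-- literal port of B: filter truthy prefix candidates, stable sort by len descending, first element or none
def identify_fs_from_path_py_alt (path : String) (mounts : List String) : Option String :=
  let candidates :=
    (mounts.filter (fun m => (!(PySem.Str.len m == 0)) && PySem.Str.startswith path m))
  match PySem.List.sorted candidates (fun m => PySem.Str.len m) true with
  | [] => none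
  | c :: _ => some c

-- ===== PRECONDITION & SPEC =====
def Spec_identify_fs_from_path_py (path : String) (mounts : List String) (out : Option String) : Prop := out = identify_fs_from_path_py_alt path mounts
instance (path : String) (mounts : List String) (out : Option String) : Decidable (Spec_identify_fs_from_path_py path mounts out) := by unfold Spec_identify_fs_from_path_py; infer_instance

-- ===== CLAIM (what is proved, stated in full; the proofs are below) =====
def Claim_equal_identify_fs_from_path_py : Prop := ∀ (path : String) (mounts : List String), Dom_identify_fs_from_path_py path mounts → Spec_identify_fs_from_path_py path mounts (identify_fs_from_path_py path mounts)

-- ===== LEMMAS AND PROOFS =====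

-- A's loop step and B's insertion step, named for the proofs
def pvAStep (path : String) (s : Int × Option String) (mount : String) : Int × Option String :=
  if PySem.Str.startswith path mount = true ∧ s.1 < PySem.Str.len mount then
    (PySem.Str.len mount, some mount)
  else s

def pvCStep (s : Int × Option String) (mount : String) : Int × Option String :=
  if s.1 < PySem.Str.len mount then (PySem.Str.len mount, some mount) else s

def pvStateOf (acc : List String) : Int × Option String :=
  match acc.head? with
  | none => (0, none)
  | some h => (PySem.Str.len h, some h)

lemma pv_len_nonneg (m : String) : 0 ≤ PySem.Str.len m := by
  simp [PySem.Str.len_eq]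

lemma pv_stateOf_head (L : List String) : (pvStateOf L).2 = L.head? := by
  cases L <;> rfl

-- A's fold over all mounts equals the candidate-only fold over the filtered list
lemma pv_fold_filter (path : String) : ∀ (mounts : List String) (s : Int × Option String), 0 ≤ s.1 →
    List.foldl (pvAStep path) s mounts =
    List.foldl pvCStep s
      (mounts.filter (fun m => (!(PySem.Str.len m == 0)) && PySem.Str.startswith path m)) := by
  intro mounts
  induction mounts with
  | nil => intro s _; rfl
  | cons m t ih =>
    intro s hs
    by_cases hp : ((!(PySem.Str.len m == 0)) && PySem.Str.startswith path m) = true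
    · have hp' := hp
      simp only [Bool.and_eq_true, Bool.not_eq_true', beq_eq_false_iff_ne] at hp'
      have hstep : pvAStep path s m = pvCStep s m := by
        simp only [pvAStep, pvCStep, hp'.2, true_and]
      have hpos : 0 ≤ (pvCStep s m).1 := by
        unfold pvCStep
        split
        · exact pv_len_nonneg m
        · exact hs
      rw [List.filter_cons_of_pos
            (p := fun m => (!(PySem.Str.len m == 0)) && PySem.Str.startswith path m) hp,
          List.foldl_cons, List.foldl_cons, hstep]
      exact ih _ hpos
    · have hstep : pvAStep path s m = s := by
        unfold pvAStep
        rw [if_neg]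
        rintro ⟨hsw, hlt⟩
        have hlen0 : PySem.Str.len m = 0 := by
          by_contra hne
          exact hp (by
            simp only [Bool.and_eq_true, Bool.not_eq_true', beq_eq_false_iff_ne]
            exact ⟨hne, hsw⟩)
        rw [hlen0] at hlt
        omega
      rw [List.filter_cons_of_neg
            (p := fun m => (!(PySem.Str.len m == 0)) && PySem.Str.startswith path m) hp,
          List.foldl_cons, hstep]
      exact ih s hs

-- the candidate fold tracks exactly the head of the stable-insertion accumulator
lemma pv_fold_insert (l : List String) : ∀ (acc : List String),
    (∀ m ∈ l, PySem.Str.len m ≠ 0) →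
    List.foldl pvCStep (pvStateOf acc) l =
    pvStateOf (List.foldl
      (fun acc x => PySem.List.insertBy (fun a b => decide (PySem.Str.len b < PySem.Str.len a)) x acc)
      acc l) := by
  induction l with
  | nil => intro acc _; rfl
  | cons x t ih =>
    intro acc hne
    have hx : PySem.Str.len x ≠ 0 := hne x (by simp)
    have hxpos : (0 : Int) < PySem.Str.len x :=
      lt_of_le_of_ne (pv_len_nonneg x) (Ne.symm hx)
    have hstep : pvCStep (pvStateOf acc) x =
        pvStateOf (PySem.List.insertBy (fun a b => decide (PySem.Str.len b < PySem.Str.len a)) x acc) := by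
      cases acc with
      | nil =>
        simp only [PySem.List.insertBy, pvCStep, pvStateOf, List.head?]
        rw [if_pos hxpos]
      | cons h tl =>
        simp only [PySem.List.insertBy, pvCStep, pvStateOf, List.head?]
        by_cases hlt : PySem.Str.len h < PySem.Str.len x
        · rw [if_pos hlt, if_pos (by simpa using hlt)]
        · rw [if_neg hlt, if_neg (by simpa using hlt)]
    rw [List.foldl_cons, List.foldl_cons, hstep]
    exact ih _ (fun m hm => hne m (by simp [hm]))

-- ===== VERDICT (by name: the statement is the Claim_ definition above) =====
theorem identify_fs_from_path_py_spec : Claim_equal_identify_fs_from_path_py := by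
  intro path mounts _
  unfold Spec_identify_fs_from_path_py identify_fs_from_path_py identify_fs_from_path_py_alt
  change (List.foldl (pvAStep path) ((0 : Int), (none : Option String)) mounts).2 =
    (match PySem.List.sorted
      (mounts.filter (fun m => (!(PySem.Str.len m == 0)) && PySem.Str.startswith path m))
      (fun m => PySem.Str.len m) true with
      | [] => (none : Option String)
      | c :: _ => some c)
  have hne : ∀ m ∈ mounts.filter (fun m => (!(PySem.Str.len m == 0)) && PySem.Str.startswith path m),
      PySem.Str.len m ≠ 0 := by
    intro m hm
    have h := List.of_mem_filter hm
    simp only [Bool.and_eq_true, Bool.not_eq_true', beq_eq_false_iff_ne] at h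
    exact h.1
  rw [pv_fold_filter path mounts _ (by norm_num),
      show ((0 : Int), (none : Option String)) = pvStateOf [] from rfl,
      pv_fold_insert _ [] hne, pv_stateOf_head,
      ← PySem.List.sorted_rev_eq_foldl_insertBy]
  cases PySem.List.sorted
      (mounts.filter (fun m => (!(PySem.Str.len m == 0)) && PySem.Str.startswith path m))
      (fun m => PySem.Str.len m) true <;> rfl
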